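-- pv_equiv track=rewrite | github.com/DawidKahla/whfrp2_char_gen | main.py | roll_random_ability
-- ===== SOURCE A (Python) =====
-- def roll_random_ability(race, roll):
--     common_mapping = {
--         (1,4): 'Bardzo silny',
--         (5,9): 'Bardzo szybki',
--         (10,13): 'Błyskotliwość',
--         (14,18): 'Bystry wzrok',
--     }
--     halfling_mapping = common_mapping | {
--         (19,23): 'Charyzmatyczny',
--         (24,28): 'Czuły słuch',
--         (29,34): 'Geniusz arytmetyczny',
--         (35,39): 'Krzepki',
--         (40,44): 'Naśladowca',
--         (45,49): 'Niezwykle odporny',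
--         (50,53): 'Oburęczność',
--         (54,58): 'Odporność na choroby',
--         (59,62): 'Odporność na magię',
--         (63,64): 'Odporność na trucizny',
--         (65,68): 'Odporność psychiczna',
--         (69,73): 'Opanowanie',
--         (74,78): 'Strzelec wyborowy',
--         (79,82): 'Szczęście',
--         (83,87): 'Szósty zmysł',
--         (88,92): 'Szybki refleks',
--         (93,96): 'Twardziel',
--         (97,100): 'Urodzony wojownik'
--     }
--     human_mapping = common_mapping | {
--         (19,22): 'Charyzmatyczny',
--         (23,27): 'Czuły słuch',
--         (28,31): 'Geniusz arytmetyczny',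
--         (32,35): 'Krzepki',
--         (36,40): 'Naśladowca',
--         (41,44): 'Niezwykle odporny',
--         (45,49): 'Oburęczność',
--         (50,53): 'Odporność na choroby',
--         (54,57): 'Odporność na magię',
--         (58,61): 'Odporność na trucizny',
--         (62,66): 'Odporność psychiczna',
--         (67,71): 'Opanowanie',
--         (72,75): 'Strzelec wyborowy',
--         (76,79): 'Szczęście',
--         (80,83): 'Szósty zmysł',
--         (84,87): 'Szybki refleks',
--         (88,91): 'Twardziel',
--         (92,95): 'Urodzony wojownik',
--         (96,100): 'Widzenie w ciemności'
--     }
--     if race == 'halfling':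
--         keys = halfling_mapping.keys()
--     elif race == 'human':
--         keys = human_mapping.keys()
--     else:
--         raise Exception("Wrong race in roll_random_ability")
--
--     for key in keys:
--         minimum, maximum = key
--         if roll >= minimum and roll <= maximum:
--             if race == 'halfling':
--                 return halfling_mapping[key]
--             else:
--                 return human_mapping[key]
-- ===== SOURCE B (Python) =====
-- # Binary search over cumulative upper bounds instead of scanning (lo, hi) intervals.
-- # Each race's abilities cover 1..100 contiguously, so only each band's upper bound matters.
--
-- _HALFLING = [
--     (4, 'Bardzo silny'), (9, 'Bardzo szybki'), (13, 'Błyskotliwość'),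
--     (18, 'Bystry wzrok'), (23, 'Charyzmatyczny'), (28, 'Czuły słuch'),
--     (34, 'Geniusz arytmetyczny'), (39, 'Krzepki'), (44, 'Naśladowca'),
--     (49, 'Niezwykle odporny'), (53, 'Oburęczność'), (58, 'Odporność na choroby'),
--     (62, 'Odporność na magię'), (64, 'Odporność na trucizny'),
--     (68, 'Odporność psychiczna'), (73, 'Opanowanie'), (78, 'Strzelec wyborowy'),
--     (82, 'Szczęście'), (87, 'Szósty zmysł'), (92, 'Szybki refleks'),
--     (96, 'Twardziel'), (100, 'Urodzony wojownik'),
-- ]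
--
-- _HUMAN = [
--     (4, 'Bardzo silny'), (9, 'Bardzo szybki'), (13, 'Błyskotliwość'),
--     (18, 'Bystry wzrok'), (22, 'Charyzmatyczny'), (27, 'Czuły słuch'),
--     (31, 'Geniusz arytmetyczny'), (35, 'Krzepki'), (40, 'Naśladowca'),
--     (44, 'Niezwykle odporny'), (49, 'Oburęczność'), (53, 'Odporność na choroby'),
--     (57, 'Odporność na magię'), (61, 'Odporność na trucizny'),
--     (66, 'Odporność psychiczna'), (71, 'Opanowanie'), (75, 'Strzelec wyborowy'),
--     (79, 'Szczęście'), (83, 'Szósty zmysł'), (87, 'Szybki refleks'),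
--     (91, 'Twardziel'), (95, 'Urodzony wojownik'), (100, 'Widzenie w ciemności'),
-- ]
--
--
-- def roll_random_ability(race, roll):
--     if race == 'halfling':
--         table = _HALFLING
--     elif race == 'human':
--         table = _HUMAN
--     else:
--         raise Exception("Wrong race in roll_random_ability")
--     if roll < 1 or roll > 100:
--         return None
--     # first index whose upper bound is >= roll (bisect_left by hand)
--     lo, hi = 0, len(table)
--     while lo < hi:
--         mid = (lo + hi) // 2
--         if table[mid][0] < roll:
--             lo = mid + 1
--         else:
--             hi = mid
--     return table[lo][1]
-- ===== Notes on version B (the rewrite author's own statement) =====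
-- stated objective: alternative
-- what changed: Replaces the linear scan over (lo,hi) interval keys with a hand-written binary search (bisect_left) over each race's cumulative upper bounds, with an explicit 1..100 range guard returning None.
import Mathlib
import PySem

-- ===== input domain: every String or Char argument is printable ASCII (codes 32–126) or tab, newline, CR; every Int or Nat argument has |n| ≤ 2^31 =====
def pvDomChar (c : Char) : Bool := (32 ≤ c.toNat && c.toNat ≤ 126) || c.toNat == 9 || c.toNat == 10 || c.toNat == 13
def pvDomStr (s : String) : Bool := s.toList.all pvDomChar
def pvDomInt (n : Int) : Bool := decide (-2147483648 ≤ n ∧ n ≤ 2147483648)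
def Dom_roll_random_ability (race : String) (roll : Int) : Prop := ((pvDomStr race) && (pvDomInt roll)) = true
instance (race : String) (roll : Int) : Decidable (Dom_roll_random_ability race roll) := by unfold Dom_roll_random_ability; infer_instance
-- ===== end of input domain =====

-- B replaces A's linear scan over (lo,hi) interval keys by a binary search over cumulative
-- upper bounds (alternative structure; the race Exception inputs are outside Pre_).

-- ===== PORT A =====
-- A's dicts keyed by (lo,hi) tuples, in insertion order; `common_mapping | extra` is
-- concatenation here because the key sets are disjoint.
def pvCommonA : List ((Int × Int) × String) :=
  [((1,4), "Bardzo silny"), ((5,9), "Bardzo szybki"), ((10,13), "Błyskotliwość"),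
   ((14,18), "Bystry wzrok")]
def pvHalflingA : List ((Int × Int) × String) :=
  pvCommonA ++
  [((19,23), "Charyzmatyczny"), ((24,28), "Czuły słuch"), ((29,34), "Geniusz arytmetyczny"),
   ((35,39), "Krzepki"), ((40,44), "Naśladowca"), ((45,49), "Niezwykle odporny"),
   ((50,53), "Oburęczność"), ((54,58), "Odporność na choroby"), ((59,62), "Odporność na magię"),
   ((63,64), "Odporność na trucizny"), ((65,68), "Odporność psychiczna"), ((69,73), "Opanowanie"),
   ((74,78), "Strzelec wyborowy"), ((79,82), "Szczęście"), ((83,87), "Szósty zmysł"),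
   ((88,92), "Szybki refleks"), ((93,96), "Twardziel"), ((97,100), "Urodzony wojownik")]
def pvHumanA : List ((Int × Int) × String) :=
  pvCommonA ++
  [((19,22), "Charyzmatyczny"), ((23,27), "Czuły słuch"), ((28,31), "Geniusz arytmetyczny"),
   ((32,35), "Krzepki"), ((36,40), "Naśladowca"), ((41,44), "Niezwykle odporny"),
   ((45,49), "Oburęczność"), ((50,53), "Odporność na choroby"), ((54,57), "Odporność na magię"),
   ((58,61), "Odporność na trucizny"), ((62,66), "Odporność psychiczna"), ((67,71), "Opanowanie"),
   ((72,75), "Strzelec wyborowy"), ((76,79), "Szczęście"), ((80,83), "Szósty zmysł"),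
   ((84,87), "Szybki refleks"), ((88,91), "Twardziel"), ((92,95), "Urodzony wojownik"),
   ((96,100), "Widzenie w ciemności")]

-- the `for key in keys: …` loop; `mapping[key]` is the entry of the iterated key (keys distinct)
def pvScanA : List ((Int × Int) × String) → Int → Option String
  | [], _ => none
  | ((mn, mx), name) :: rest, roll =>
      if roll ≥ mn ∧ roll ≤ mx then some name else pvScanA rest roll

def roll_random_ability (race : String) (roll : Int) : Option String :=
  if race = "halfling" then pvScanA pvHalflingA roll
  else if race = "human" then pvScanA pvHumanA roll
  else none  -- Python raises Exception here; excluded by Pre_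

-- ===== PORT B =====
def pvHalflingB : List (Int × String) :=
  [(4, "Bardzo silny"), (9, "Bardzo szybki"), (13, "Błyskotliwość"), (18, "Bystry wzrok"),
   (23, "Charyzmatyczny"), (28, "Czuły słuch"), (34, "Geniusz arytmetyczny"), (39, "Krzepki"),
   (44, "Naśladowca"), (49, "Niezwykle odporny"), (53, "Oburęczność"),
   (58, "Odporność na choroby"), (62, "Odporność na magię"), (64, "Odporność na trucizny"),
   (68, "Odporność psychiczna"), (73, "Opanowanie"), (78, "Strzelec wyborowy"),
   (82, "Szczęście"), (87, "Szósty zmysł"), (92, "Szybki refleks"), (96, "Twardziel"),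
   (100, "Urodzony wojownik")]
def pvHumanB : List (Int × String) :=
  [(4, "Bardzo silny"), (9, "Bardzo szybki"), (13, "Błyskotliwość"), (18, "Bystry wzrok"),
   (22, "Charyzmatyczny"), (27, "Czuły słuch"), (31, "Geniusz arytmetyczny"), (35, "Krzepki"),
   (40, "Naśladowca"), (44, "Niezwykle odporny"), (49, "Oburęczność"),
   (53, "Odporność na choroby"), (57, "Odporność na magię"), (61, "Odporność na trucizny"),
   (66, "Odporność psychiczna"), (71, "Opanowanie"), (75, "Strzelec wyborowy"),
   (79, "Szczęście"), (83, "Szósty zmysł"), (87, "Szybki refleks"), (91, "Twardziel"),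
   (95, "Urodzony wojownik"), (100, "Widzenie w ciemności")]

-- the `while lo < hi` bisect_left loop; fuel only makes the recursion structural, and all
-- indexing stays inside the list so getD's default is never read.
def pvBisect (t : List (Int × String)) (roll : Int) : Nat → Nat → Nat → Nat
  | 0, lo, _ => lo
  | fuel + 1, lo, hi =>
      if lo < hi then
        let mid := (lo + hi) / 2
        if (t.getD mid (0, "")).1 < roll then pvBisect t roll fuel (mid + 1) hi
        else pvBisect t roll fuel lo mid
      else lo

def pvLookupB (t : List (Int × String)) (roll : Int) : Option String :=
  if roll < 1 ∨ roll > 100 then none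
  else some (t.getD (pvBisect t roll t.length 0 t.length) (0, "")).2

def roll_random_ability_alt (race : String) (roll : Int) : Option String :=
  if race = "halfling" then pvLookupB pvHalflingB roll
  else if race = "human" then pvLookupB pvHumanB roll
  else none  -- Python raises Exception here; excluded by Pre_

-- ===== PRECONDITION & SPEC =====
-- A raises Exception("Wrong race …") for every race other than these two; Pre_ excludes exactly those.
def Pre_roll_random_ability (race : String) (roll : Int) : Prop :=
  race = "halfling" ∨ race = "human"
instance (race : String) (roll : Int) : Decidable (Pre_roll_random_ability race roll) := by
  unfold Pre_roll_random_ability; infer_instance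

def pvWitness_roll_random_ability : String × Int := ("human", 50)

def Spec_roll_random_ability (race : String) (roll : Int) (out : Option String) : Prop := out = roll_random_ability_alt race roll
instance (race : String) (roll : Int) (out : Option String) : Decidable (Spec_roll_random_ability race roll out) := by unfold Spec_roll_random_ability; infer_instance

-- ===== CLAIM (what is proved, stated in full; the proofs are below) =====
def Claim_equal_roll_random_ability : Prop := ∀ (race : String) (roll : Int), Dom_roll_random_ability race roll → Pre_roll_random_ability race roll → Spec_roll_random_ability race roll (roll_random_ability race roll)

-- ===== LEMMAS AND PROOFS =====
lemma pvScanA_none {roll : Int} (t : List ((Int × Int) × String))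
    (hb : ∀ p ∈ t, 1 ≤ p.1.1 ∧ p.1.2 ≤ 100) (h : roll < 1 ∨ roll > 100) :
    pvScanA t roll = none := by
  induction t with
  | nil => rfl
  | cons p rest ih =>
      obtain ⟨⟨mn, mx⟩, name⟩ := p
      have hp := hb _ (List.mem_cons_self ..)
      rw [pvScanA, if_neg (by simp at hp ⊢; omega)]
      exact ih fun q hq => hb q (List.mem_cons_of_mem _ hq)

lemma pvScanA_halfling_none {roll : Int} (h : roll < 1 ∨ roll > 100) :
    pvScanA pvHalflingA roll = none :=
  pvScanA_none _ (by decide) h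

lemma pvScanA_human_none {roll : Int} (h : roll < 1 ∨ roll > 100) :
    pvScanA pvHumanA roll = none :=
  pvScanA_none _ (by decide) h

lemma pv_halfling_eq {roll : Int} : pvScanA pvHalflingA roll = pvLookupB pvHalflingB roll := by
  by_cases h1 : 1 ≤ roll
  · by_cases h2 : roll ≤ 100
    · interval_cases roll <;> decide
    · rw [pvScanA_halfling_none (by omega), pvLookupB, if_pos (by omega)]
  · rw [pvScanA_halfling_none (by omega), pvLookupB, if_pos (by omega)]

lemma pv_human_eq {roll : Int} : pvScanA pvHumanA roll = pvLookupB pvHumanB roll := by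
  by_cases h1 : 1 ≤ roll
  · by_cases h2 : roll ≤ 100
    · interval_cases roll <;> decide
    · rw [pvScanA_human_none (by omega), pvLookupB, if_pos (by omega)]
  · rw [pvScanA_human_none (by omega), pvLookupB, if_pos (by omega)]

-- ===== VERDICT (by name: the statement is the Claim_ definition above) =====
theorem roll_random_ability_spec : Claim_equal_roll_random_ability := by
  intro race roll _ hpre
  rcases hpre with h | h <;> subst h <;>
    simp only [Spec_roll_random_ability, roll_random_ability, roll_random_ability_alt,
      reduceIte] <;>
    first
      | exact pv_halfling_eq
      | exact pv_human_eq
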